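-- pv_equiv track=rewrite | github.com/DarkSario/CLUBConcours | src/clubconcours/core/draw.py | _group_players_by_wins
-- ===== SOURCE A (Python) =====
-- def _group_players_by_wins(
--     player_ids: list[int],
--     wins_by_player: dict[int, int],
--     plus_by_player: dict[int, int],
-- ) -> list[tuple[int, list[int]]]:
--     groups: dict[int, list[int]] = {}
--     for pid in player_ids:
--         w = int(wins_by_player.get(pid, 0))
--         groups.setdefault(w, []).append(pid)
--
--     out: list[tuple[int, list[int]]] = []
--     for w, pids in groups.items():
--         pids.sort(key=lambda pid: plus_by_player.get(pid, 0), reverse=True)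
--         out.append((w, pids))
--
--     out.sort(key=lambda x: x[0], reverse=True)
--     return out
-- ===== SOURCE B (Python) =====
-- def _group_players_by_wins(
--     player_ids: list[int],
--     wins_by_player: dict[int, int],
--     plus_by_player: dict[int, int],
-- ) -> list[tuple[int, list[int]]]:
--     wins = {int(wins_by_player.get(p, 0)) for p in player_ids}
--     return [
--         (w, sorted([p for p in player_ids if int(wins_by_player.get(p, 0)) == w],
--                    key=lambda p: plus_by_player.get(p, 0), reverse=True))
--         for w in sorted(wins, reverse=True)
--     ]
-- ===== Notes on version B (the rewrite author's own statement) =====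
-- stated objective: alternative
-- what changed: Replaces A's dict-of-lists grouping plus two separate reverse sorts of dict items with a direct construction: collect the set of distinct win values, sort it descending, and build each group by filtering player_ids on that win value and sorting it by plus descending.
import Mathlib
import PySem

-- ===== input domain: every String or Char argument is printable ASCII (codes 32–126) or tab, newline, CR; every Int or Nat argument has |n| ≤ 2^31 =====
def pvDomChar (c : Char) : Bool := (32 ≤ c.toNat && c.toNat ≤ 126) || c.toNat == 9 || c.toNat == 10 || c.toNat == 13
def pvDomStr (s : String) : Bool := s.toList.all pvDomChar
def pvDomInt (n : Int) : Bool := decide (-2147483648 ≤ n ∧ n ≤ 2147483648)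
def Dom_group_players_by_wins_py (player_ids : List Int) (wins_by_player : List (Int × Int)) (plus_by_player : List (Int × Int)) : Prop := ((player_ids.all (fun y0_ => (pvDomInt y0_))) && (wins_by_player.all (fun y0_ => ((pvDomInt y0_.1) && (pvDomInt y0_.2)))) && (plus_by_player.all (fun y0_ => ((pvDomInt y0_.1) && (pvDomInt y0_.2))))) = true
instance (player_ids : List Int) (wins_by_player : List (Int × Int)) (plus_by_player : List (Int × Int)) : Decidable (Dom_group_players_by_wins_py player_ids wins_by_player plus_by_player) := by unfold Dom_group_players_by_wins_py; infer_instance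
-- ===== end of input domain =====

-- ===== PORT A =====
-- B differs from A by a different decomposition: no dict grouping, one filter pass per distinct win value.
-- A mutates its per-group lists in place (pids.sort); the equivalence proved here is about the return value only.
def group_players_by_wins_py (player_ids : List Int) (wins_by_player : List (Int × Int)) (plus_by_player : List (Int × Int)) : List (Int × List Int) :=
  let winsD := PySem.Dict.ofList wins_by_player
  let plusD := PySem.Dict.ofList plus_by_player
  -- groups.setdefault(w, []).append(pid)  ≡  groups[w] = groups.get(w, []) + [pid]  (in-place append modeled functionally)
  let groups := player_ids.foldl (fun d pid => d.modify (winsD.getD pid 0) [] (fun pids => pids ++ [pid])) PySem.Dict.empty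
  -- for w, pids in groups.items(): pids.sort(key=..., reverse=True); out.append((w, pids))
  let out := groups.items.foldl
    (fun out wp => out ++ [(wp.1, PySem.List.sorted wp.2 (fun pid => plusD.getD pid 0) true)]) []
  PySem.List.sorted out (fun x => x.1) true

-- ===== PORT B =====
def group_players_by_wins_py_alt (player_ids : List Int) (wins_by_player : List (Int × Int)) (plus_by_player : List (Int × Int)) : List (Int × List Int) :=
  let winsD := PySem.Dict.ofList wins_by_player
  let plusD := PySem.Dict.ofList plus_by_player
  -- wins = {int(wins_by_player.get(p, 0)) for p in player_ids}; sorting a set with the identity key is order-exact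
  let wins := PySem.Set.ofList (player_ids.map (fun p => winsD.getD p 0))
  (PySem.List.sorted wins (fun w => w) true).map
    (fun w => (w, PySem.List.sorted (player_ids.filter (fun p => winsD.getD p 0 == w))
                    (fun p => plusD.getD p 0) true))

-- ===== PRECONDITION & SPEC =====
def Spec_group_players_by_wins_py (player_ids : List Int) (wins_by_player : List (Int × Int)) (plus_by_player : List (Int × Int)) (out : List (Int × List Int)) : Prop := out = group_players_by_wins_py_alt player_ids wins_by_player plus_by_player
instance (player_ids : List Int) (wins_by_player : List (Int × Int)) (plus_by_player : List (Int × Int)) (out : List (Int × List Int)) : Decidable (Spec_group_players_by_wins_py player_ids wins_by_player plus_by_player out) := by unfold Spec_group_players_by_wins_py; infer_instance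

-- ===== CLAIM (what is proved, stated in full; the proofs are below) =====
def Claim_equal_group_players_by_wins_py : Prop := ∀ (player_ids : List Int) (wins_by_player : List (Int × Int)) (plus_by_player : List (Int × Int)), Dom_group_players_by_wins_py player_ids wins_by_player plus_by_player → Spec_group_players_by_wins_py player_ids wins_by_player plus_by_player (group_players_by_wins_py player_ids wins_by_player plus_by_player)

-- ===== LEMMAS AND PROOFS =====

-- A's grouping dict, characterised: its keys are the distinct win values in first-seen order,
-- and the entry at w is the sublist of player_ids whose win value is w.
theorem groups_keys (player_ids : List Int) (winsD : PySem.Dict Int Int) :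
    (player_ids.foldl (fun d pid => d.modify (winsD.getD pid 0) [] (fun pids => pids ++ [pid]))
      (PySem.Dict.empty : PySem.Dict Int (List Int))).keys
      = PySem.Set.ofList (player_ids.map (fun p => winsD.getD p 0)) := by
  rw [PySem.Dict.keys_foldl_modify_key player_ids (fun p => winsD.getD p 0) []
        (fun _ pid pids => pids ++ [pid]), PySem.Set.ofList_eq_foldl, List.foldl_map]
  simp [pysem]

theorem groups_getD (player_ids : List Int) (winsD : PySem.Dict Int Int) (w : Int) :
    (player_ids.foldl (fun d pid => d.modify (winsD.getD pid 0) [] (fun pids => pids ++ [pid]))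
      (PySem.Dict.empty : PySem.Dict Int (List Int))).getD w []
      = player_ids.filter (fun p => winsD.getD p 0 == w) := by
  have h := PySem.Dict.getD_foldl_modify_append
    (player_ids.map (fun p => ((winsD.getD p 0 : Int), p)))
    (PySem.Dict.empty : PySem.Dict Int (List Int)) w
  rw [List.foldl_map] at h
  simpa [List.filter_map, List.map_map, Function.comp_def] using h

-- the whole equivalence, on the two dicts as abstract values
theorem grouping_main (player_ids : List Int) (winsD plusD : PySem.Dict Int Int) :
    PySem.List.sorted
      ((player_ids.foldl (fun d pid => d.modify (winsD.getD pid 0) [] (fun pids => pids ++ [pid]))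
          (PySem.Dict.empty : PySem.Dict Int (List Int))).items.foldl
        (fun out wp => out ++ [(wp.1, PySem.List.sorted wp.2 (fun pid => plusD.getD pid 0) true)]) [])
      (fun x => x.1) true
    = (PySem.List.sorted (PySem.Set.ofList (player_ids.map (fun p => winsD.getD p 0)))
        (fun w => w) true).map
        (fun w => (w, PySem.List.sorted (player_ids.filter (fun p => winsD.getD p 0 == w))
                        (fun p => plusD.getD p 0) true)) := by
  set groups := player_ids.foldl
    (fun d pid => d.modify (winsD.getD pid 0) [] (fun pids => pids ++ [pid]))
    (PySem.Dict.empty : PySem.Dict Int (List Int)) with hg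
  have hnd : groups.keys.Nodup := by
    rw [hg]
    exact PySem.Dict.nodup_keys_foldl_modify_key player_ids (fun p => winsD.getD p 0) []
      (fun _ pid pids => pids ++ [pid]) _ PySem.Dict.nodup_keys_empty
  have hkeys : groups.keys = PySem.Set.ofList (player_ids.map (fun p => winsD.getD p 0)) := by
    rw [hg]; exact groups_keys player_ids winsD
  rw [PySem.List.foldl_append_singleton_eq_map
        (fun wp => (wp.1, PySem.List.sorted wp.2 (fun pid => plusD.getD pid 0) true)) groups.items []]
  rw [PySem.Dict.items_eq_map_keys groups hnd []]
  rw [List.map_map]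
  set g : Int → Int × List Int := fun w =>
    (w, PySem.List.sorted (player_ids.filter (fun p => winsD.getD p 0 == w))
          (fun p => plusD.getD p 0) true) with hgdef
  have hmapeq : (((fun wp : Int × List Int =>
      (wp.1, PySem.List.sorted wp.2 (fun pid => plusD.getD pid 0) true)) ∘
      fun k => (k, groups.getD k [])) : Int → Int × List Int) = g := by
    funext k
    simp only [Function.comp, hgdef]
    rw [hg, groups_getD player_ids winsD k]
  rw [hmapeq, ← hkeys]
  apply PySem.List.sorted_rev_eq_of_perm_of_pairwise_gt
  · exact ((PySem.List.sorted_perm groups.keys (fun w => w) true).map g)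
  · have hp : (PySem.List.sorted groups.keys (fun w => w) true).Pairwise
        (fun a b => b < a) := by
      have h1 := PySem.List.sorted_pairwise_rev groups.keys (fun w => w)
      have h2 : (PySem.List.sorted groups.keys (fun w => w) true).Nodup :=
        (PySem.List.sorted_perm groups.keys (fun w => w) true).nodup_iff.mpr hnd
      have := h1.and h2
      exact this.imp (fun h => lt_of_le_of_ne h.1 (by exact fun e => h.2 e.symm))
    refine (List.pairwise_map).mpr (hp.imp ?_)
    intro a b h
    simpa [hgdef] using h

-- ===== VERDICT (by name: the statement is the Claim_ definition above) =====
theorem group_players_by_wins_py_spec : Claim_equal_group_players_by_wins_py := by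
  intro player_ids wins_by_player plus_by_player _
  exact grouping_main player_ids (PySem.Dict.ofList wins_by_player) (PySem.Dict.ofList plus_by_player)
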